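-- pv_equiv track=rewrite | github.com/tassieee/IEEEXtreme-18.0. | Brick stacks.py | solve_brick_stacks
-- ===== SOURCE A (Python) =====
-- def solve_brick_stacks(N, x, bricks):
--     # Sort bricks in descending order and keep track of original indices
--     brick_pairs = [(brick, i+1) for i, brick in enumerate(bricks)]
--     brick_pairs.sort(reverse=True)  # Sort by length (descending)
--
--     # Initialize stacks list to store the final arrangement
--     stacks = []
--     used = set()
--
--     # Process each brick from largest to smallest
--     for brick, idx in brick_pairs:
--         # If brick is already used, skip it
--         if idx in used:
--             continue
--
--         # Start a new stack with current brick
--         current_stack = [(brick, idx)]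
--         used.add(idx)
--         last_brick = brick
--
--         # Try to add more bricks to current stack
--         for next_brick, next_idx in brick_pairs:
--             if next_idx not in used and next_brick + x <= last_brick:
--                 current_stack.append((next_brick, next_idx))
--                 used.add(next_idx)
--                 last_brick = next_brick
--
--         stacks.append(current_stack)
--
--     return stacks
-- ===== SOURCE B (Python) =====
-- def solve_brick_stacks(N, x, bricks):
--     # Single pass, first-fit: each brick (in descending order) is appended to the
--     # first open stack whose current top is at least brick + x, else it opens a
--     # new stack; no used-set and no per-stack rescans of the brick list.
--     pairs = sorted(((b, i + 1) for i, b in enumerate(bricks)), reverse=True)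
--     open_stacks = []  # list of [stack, last]
--     for p in pairs:
--         for slot in open_stacks:
--             if p[0] + x <= slot[1]:
--                 slot[0].append(p)
--                 slot[1] = p[0]
--                 break
--         else:
--             open_stacks.append([[p], p[0]])
--     return [s for s, _ in open_stacks]
-- ===== Notes on version B (the rewrite author's own statement) =====
-- stated objective: alternative
-- what changed: A builds stacks one at a time, each with a fresh rescan of the whole sorted list guarded by a global used-set; B makes a single pass over the sorted bricks and places each brick once, into the first open stack whose top still fits (first-fit), opening a new stack otherwise.
import Mathlib
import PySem

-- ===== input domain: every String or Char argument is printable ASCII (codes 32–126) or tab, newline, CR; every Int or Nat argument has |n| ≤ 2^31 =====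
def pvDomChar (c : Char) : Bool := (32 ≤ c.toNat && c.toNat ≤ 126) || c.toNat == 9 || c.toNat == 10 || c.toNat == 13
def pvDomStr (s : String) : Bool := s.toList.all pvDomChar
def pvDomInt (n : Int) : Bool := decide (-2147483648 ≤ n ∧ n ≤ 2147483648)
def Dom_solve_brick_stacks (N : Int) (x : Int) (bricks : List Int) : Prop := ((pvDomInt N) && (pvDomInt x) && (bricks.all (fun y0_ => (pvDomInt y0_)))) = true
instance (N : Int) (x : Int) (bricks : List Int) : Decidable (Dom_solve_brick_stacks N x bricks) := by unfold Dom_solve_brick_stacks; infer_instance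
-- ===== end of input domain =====

-- B replaces A's stack-at-a-time rescans (with a used-set) by one first-fit pass
-- over the sorted bricks, placing each brick exactly once (alternative algorithm).

-- ===== PORT A =====
-- inner loop: for next_brick, next_idx in brick_pairs: …   state = (current_stack, used, last_brick)
def pvStepInnerA (x : Int) (st : List (Int × Int) × PySem.Set Int × Int) (p : Int × Int) :
    List (Int × Int) × PySem.Set Int × Int :=
  if ¬ (PySem.Set.contains st.2.1 p.2 = true) ∧ p.1 + x ≤ st.2.2 then
    (st.1 ++ [p], PySem.Set.add st.2.1 p.2, p.1)
  else st

-- outer loop body: state = (stacks, used)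
def pvStepOuterA (x : Int) (bps : List (Int × Int)) (st : List (List (Int × Int)) × PySem.Set Int)
    (p : Int × Int) : List (List (Int × Int)) × PySem.Set Int :=
  if PySem.Set.contains st.2 p.2 = true then st
  else
    let r := bps.foldl (pvStepInnerA x) ([p], PySem.Set.add st.2 p.2, p.1)
    (st.1 ++ [r.1], r.2.1)

def solve_brick_stacks (N : Int) (x : Int) (bricks : List Int) : List (List (Int × Int)) :=
  let brick_pairs := PySem.List.sorted2
      ((PySem.List.enumerate bricks).map (fun bi => (bi.2, bi.1 + 1))) (·.1) (·.2) true
  (brick_pairs.foldl (pvStepOuterA x brick_pairs) ([], PySem.Set.empty)).1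

-- ===== PORT B =====
-- inner 'for slot in open_stacks: … break / else:' — structural recursion over the
-- open stacks, first fitting slot takes the brick, otherwise a new stack is appended
def pvPlaceB (x : Int) : List (List (Int × Int) × Int) → (Int × Int) → List (List (Int × Int) × Int)
  | [], p => [([p], p.1)]
  | (c, v) :: S, p =>
      if p.1 + x ≤ v then (c ++ [p], p.1) :: S else (c, v) :: pvPlaceB x S p

def solve_brick_stacks_alt (N : Int) (x : Int) (bricks : List Int) : List (List (Int × Int)) :=
  let pairs := PySem.List.sorted2
      ((PySem.List.enumerate bricks).map (fun bi => (bi.2, bi.1 + 1))) (·.1) (·.2) true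
  (pairs.foldl (pvPlaceB x) []).map (·.1)

-- ===== PRECONDITION & SPEC =====
def Spec_solve_brick_stacks (N : Int) (x : Int) (bricks : List Int) (out : List (List (Int × Int))) : Prop := out = solve_brick_stacks_alt N x bricks
instance (N : Int) (x : Int) (bricks : List Int) (out : List (List (Int × Int))) : Decidable (Spec_solve_brick_stacks N x bricks out) := by unfold Spec_solve_brick_stacks; infer_instance

-- ===== CLAIM (what is proved, stated in full; the proofs are below) =====
def Claim_equal_solve_brick_stacks : Prop := ∀ (N : Int) (x : Int) (bricks : List Int), Dom_solve_brick_stacks N x bricks → Spec_solve_brick_stacks N x bricks (solve_brick_stacks N x bricks)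

-- ===== LEMMAS AND PROOFS =====

-- proof-only characterisation of one greedy pass: (chain, final last, leftover)
def pvChain (x : Int) (last : Int) : List (Int × Int) → List (Int × Int) × Int × List (Int × Int)
  | [] => ([], last, [])
  | p :: t =>
    if p.1 + x ≤ last then
      (p :: (pvChain x p.1 t).1, (pvChain x p.1 t).2.1, (pvChain x p.1 t).2.2)
    else
      ((pvChain x last t).1, (pvChain x last t).2.1, p :: (pvChain x last t).2.2)

theorem pvChain_cons (x last : Int) (p : Int × Int) (t : List (Int × Int)) :
    pvChain x last (p :: t) =
      if p.1 + x ≤ last then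
        (p :: (pvChain x p.1 t).1, (pvChain x p.1 t).2.1, (pvChain x p.1 t).2.2)
      else
        ((pvChain x last t).1, (pvChain x last t).2.1, p :: (pvChain x last t).2.2) := rfl

theorem pvChain_leftover_len (x : Int) (l : List (Int × Int)) :
    ∀ last : Int, (pvChain x last l).2.2.length ≤ l.length := by
  induction l with
  | nil => intro last; simp [pvChain]
  | cons p t ih =>
      intro last
      rw [pvChain_cons]
      split <;> dsimp only <;> simp only [List.length_cons] <;>
        [exact le_trans (ih _) (Nat.le_succ _); exact Nat.succ_le_succ (ih _)]

theorem pvChain_fst_subset (x last : Int) (l : List (Int × Int)) :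
    ∀ q ∈ (pvChain x last l).1, q ∈ l := by
  induction l generalizing last with
  | nil => simp [pvChain]
  | cons p t ih =>
      intro q hq
      rw [pvChain_cons] at hq
      split at hq
      · dsimp only at hq
        rcases List.mem_cons.1 hq with h | h
        · simp [h]
        · exact List.mem_cons_of_mem _ (ih _ _ h)
      · dsimp only at hq
        exact List.mem_cons_of_mem _ (ih _ _ hq)

-- the first-fit fold, seen stack by stack: head stack eats its greedy chain,
-- the leftover falls through to the remaining open stacks in order
theorem pvFoldPlace_cons (x : Int) (l : List (Int × Int)) :
    ∀ (c : List (Int × Int)) (v : Int) (S : List (List (Int × Int) × Int)),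
      l.foldl (pvPlaceB x) ((c, v) :: S) =
        (c ++ (pvChain x v l).1, (pvChain x v l).2.1) ::
          (pvChain x v l).2.2.foldl (pvPlaceB x) S := by
  induction l with
  | nil => intro c v S; simp [pvChain]
  | cons p t ih =>
      intro c v S
      simp only [List.foldl_cons]
      by_cases h : p.1 + x ≤ v
      · rw [show pvPlaceB x ((c, v) :: S) p = (c ++ [p], p.1) :: S by
          simp [pvPlaceB, h]]
        rw [ih, pvChain_cons, if_pos h]
        simp
      · rw [show pvPlaceB x ((c, v) :: S) p = (c, v) :: pvPlaceB x S p by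
          simp [pvPlaceB, h]]
        rw [ih, pvChain_cons, if_neg h]
        simp

-- proof-only pass-peeling recursion (links A's characterisation to the first-fit fold)
def pvStepPassB (x : Int) (st : List (Int × Int) × Int × List (Int × Int)) (p : Int × Int) :
    List (Int × Int) × Int × List (Int × Int) :=
  if p.1 + x ≤ st.2.1 then (st.1 ++ [p], p.1, st.2.2) else (st.1, st.2.1, st.2.2 ++ [p])

theorem pvPassB_leftover_len (x : Int) (l : List (Int × Int)) :
    ∀ st : List (Int × Int) × Int × List (Int × Int),
      (l.foldl (pvStepPassB x) st).2.2.length ≤ st.2.2.length + l.length := by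
  induction l with
  | nil => intro st; simp
  | cons p t ih =>
      intro st
      simp only [List.foldl_cons]
      refine le_trans (ih _) ?_
      unfold pvStepPassB
      split <;> simp <;> omega

theorem pvPassB_char (x : Int) (l : List (Int × Int)) :
    ∀ (cs : List (Int × Int)) (last : Int) (lo : List (Int × Int)),
      l.foldl (pvStepPassB x) (cs, last, lo) =
        (cs ++ (pvChain x last l).1, (pvChain x last l).2.1, lo ++ (pvChain x last l).2.2) := by
  induction l with
  | nil => intro cs last lo; simp [pvChain]
  | cons p t ih =>
      intro cs last lo
      simp only [List.foldl_cons]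
      by_cases h : p.1 + x ≤ last
      · rw [show pvStepPassB x (cs, last, lo) p = (cs ++ [p], p.1, lo) by
          simp [pvStepPassB, h]]
        rw [ih, pvChain_cons, if_pos h]; simp
      · rw [show pvStepPassB x (cs, last, lo) p = (cs, last, lo ++ [p]) by
          simp [pvStepPassB, h]]
        rw [ih, pvChain_cons, if_neg h]; simp

def pvLoopB (x : Int) : List (Int × Int) → List (List (Int × Int))
  | [] => []
  | h :: rest =>
    let r := rest.foldl (pvStepPassB x) ([h], h.1, [])
    r.1 :: pvLoopB x r.2.2
termination_by l => l.length
decreasing_by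
  have := pvPassB_leftover_len x rest ([h], h.1, [])
  simp at this; simpa using Nat.lt_succ_of_le this

-- the first-fit fold computes the same stacks as pass-peeling
theorem pvFoldPlace_eq_loop (x : Int) :
    ∀ (n : Nat) (l : List (Int × Int)), l.length ≤ n →
      (l.foldl (pvPlaceB x) []).map (·.1) = pvLoopB x l := by
  intro n
  induction n with
  | zero =>
      intro l hl
      have : l = [] := List.eq_nil_of_length_eq_zero (Nat.le_zero.1 hl)
      subst this; rw [pvLoopB]; rfl
  | succ n ih =>
      intro l hl
      cases l with
      | nil => rw [pvLoopB]; rfl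
      | cons h t =>
          simp only [List.foldl_cons]
          rw [show pvPlaceB x [] h = [([h], h.1)] from rfl]
          rw [pvFoldPlace_cons]
          rw [pvLoopB]
          rw [pvPassB_char]
          simp only [List.map_cons, List.nil_append]
          refine congrArg₂ _ rfl ?_
          exact ih _ (le_trans (pvChain_leftover_len x t h.1)
            (Nat.le_of_succ_le_succ (by simpa using hl)))

-- filter away the used bricks (by index)
def pvF (u : PySem.Set Int) (l : List (Int × Int)) : List (Int × Int) :=
  l.filter (fun p => !(PySem.Set.contains u p.2))

theorem pvF_cons_of_mem (u : PySem.Set Int) (p : Int × Int) (t : List (Int × Int))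
    (h : PySem.Set.contains u p.2 = true) : pvF u (p :: t) = pvF u t := by
  simp [pvF, List.filter_cons, (PySem.Set.contains_iff _ _).1 h]

theorem pvF_cons_of_not_mem (u : PySem.Set Int) (p : Int × Int) (t : List (Int × Int))
    (h : ¬ PySem.Set.contains u p.2 = true) : pvF u (p :: t) = p :: pvF u t := by
  have h' : p.2 ∉ u := fun hm => h ((PySem.Set.contains_iff _ _).2 hm)
  simp [pvF, List.filter_cons, h']

theorem pvF_add (u : PySem.Set Int) (z : Int) (l : List (Int × Int)) :
    pvF (PySem.Set.add u z) l = (pvF u l).filter (fun q => !(q.2 == z)) := by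
  induction l with
  | nil => rfl
  | cons p t ih =>
      by_cases hm : PySem.Set.contains u p.2 = true
      · have hm' : PySem.Set.contains (PySem.Set.add u z) p.2 = true := by
          rw [PySem.Set.contains_iff] at hm ⊢
          exact (PySem.Set.mem_add _ _ _).2 (Or.inl hm)
        rw [pvF_cons_of_mem _ _ _ hm', pvF_cons_of_mem _ _ _ hm, ih]
      · by_cases hz : p.2 = z
        · have hm' : PySem.Set.contains (PySem.Set.add u z) p.2 = true := by
            rw [PySem.Set.contains_iff]
            exact (PySem.Set.mem_add _ _ _).2 (Or.inr hz)
          rw [pvF_cons_of_mem _ _ _ hm', pvF_cons_of_not_mem _ _ _ hm, ih]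
          simp [List.filter_cons, hz]
        · have hm' : ¬ PySem.Set.contains (PySem.Set.add u z) p.2 = true := by
            rw [PySem.Set.contains_iff]
            intro hc
            rcases (PySem.Set.mem_add _ _ _).1 hc with h | h
            · exact hm ((PySem.Set.contains_iff _ _).2 h)
            · exact hz h
          rw [pvF_cons_of_not_mem _ _ _ hm', pvF_cons_of_not_mem _ _ _ hm, ih]
          simp [List.filter_cons, hz]

theorem pvF_add_of_not_mem (u : PySem.Set Int) (z : Int) (l : List (Int × Int))
    (h : z ∉ (pvF u l).map (·.2)) : pvF (PySem.Set.add u z) l = pvF u l := by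
  rw [pvF_add]
  apply List.filter_eq_self.2
  intro q hq
  have : q.2 ≠ z := fun e => h (List.mem_map.2 ⟨q, hq, e⟩)
  simp [this]

theorem pvF_update (u : PySem.Set Int) (zs : List Int) (l : List (Int × Int)) :
    pvF (PySem.Set.update u zs) l = (pvF u l).filter (fun q => !(zs.contains q.2)) := by
  induction zs generalizing u with
  | nil =>
      rw [PySem.Set.update_nil]
      exact (List.filter_eq_self.2 (by intro q hq; simp)).symm
  | cons z zs ih =>
      rw [PySem.Set.update_cons, ih, pvF_add, List.filter_filter]
      apply List.filter_congr
      intro q hq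
      simp only [List.contains_cons, Bool.not_or, beq_iff_eq]
      by_cases h1 : q.2 = z <;> by_cases h2 : q.2 ∈ zs <;> simp [h1, h2]

theorem pvInnerA_char (x : Int) (M : List (Int × Int)) :
    ∀ (u : PySem.Set Int) (cs : List (Int × Int)) (last : Int),
      ((pvF u M).map (·.2)).Nodup →
      M.foldl (pvStepInnerA x) (cs, u, last) =
        (cs ++ (pvChain x last (pvF u M)).1,
         PySem.Set.update u (((pvChain x last (pvF u M)).1).map (·.2)),
         (pvChain x last (pvF u M)).2.1)
      ∧ pvF (PySem.Set.update u (((pvChain x last (pvF u M)).1).map (·.2))) M =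
          (pvChain x last (pvF u M)).2.2 := by
  induction M with
  | nil =>
      intro u cs last _
      simp [pvChain, pvF, PySem.Set.update_nil]
  | cons m t ih =>
      intro u cs last hnd
      simp only [List.foldl_cons]
      by_cases hm : PySem.Set.contains u m.2 = true
      · have hstep : pvStepInnerA x (cs, u, last) m = (cs, u, last) := by
          simp only [pvStepInnerA]
          exact if_neg (fun h => h.1 hm)
        rw [pvF_cons_of_mem _ _ _ hm] at hnd ⊢
        obtain ⟨h1, h2⟩ := ih u cs last hnd
        refine ⟨by rw [hstep, h1], ?_⟩
        have hm2 : PySem.Set.contains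
            (PySem.Set.update u (((pvChain x last (pvF u t)).1).map (·.2))) m.2 = true := by
          rw [PySem.Set.contains_iff]
          exact (PySem.Set.mem_update _ _ _).2 (Or.inl ((PySem.Set.contains_iff _ _).1 hm))
        rw [pvF_cons_of_mem _ _ _ hm2]
        exact h2
      · rw [pvF_cons_of_not_mem _ _ _ hm] at hnd ⊢
        simp only [List.map_cons, List.nodup_cons] at hnd
        obtain ⟨hm2, hnd'⟩ := hnd
        by_cases hfit : m.1 + x ≤ last
        · have hstep : pvStepInnerA x (cs, u, last) m =
              (cs ++ [m], PySem.Set.add u m.2, m.1) := by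
            simp only [pvStepInnerA]
            exact if_pos ⟨hm, hfit⟩
          have hFadd : pvF (PySem.Set.add u m.2) t = pvF u t :=
            pvF_add_of_not_mem _ _ _ hm2
          obtain ⟨h1, h2⟩ := ih (PySem.Set.add u m.2) (cs ++ [m]) m.1
            (by rw [hFadd]; exact hnd')
          rw [hFadd] at h1 h2
          rw [pvChain_cons, if_pos hfit]
          dsimp only
          constructor
          · rw [hstep, h1]
            simp [PySem.Set.update_cons]
          · have hu2 : PySem.Set.contains
                (PySem.Set.update u ((m :: (pvChain x m.1 (pvF u t)).1).map (·.2))) m.2 = true := by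
              rw [PySem.Set.contains_iff]
              exact (PySem.Set.mem_update _ _ _).2 (Or.inr (by simp))
            rw [pvF_cons_of_mem _ _ _ hu2]
            simpa [PySem.Set.update_cons] using h2
        · have hstep : pvStepInnerA x (cs, u, last) m = (cs, u, last) := by
            simp only [pvStepInnerA]
            exact if_neg (fun h => hfit h.2)
          obtain ⟨h1, h2⟩ := ih u cs last hnd'
          rw [pvChain_cons, if_neg hfit]
          dsimp only
          refine ⟨by rw [hstep, h1], ?_⟩
          have hu2 : ¬ PySem.Set.contains
              (PySem.Set.update u (((pvChain x last (pvF u t)).1).map (·.2))) m.2 = true := by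
            rw [PySem.Set.contains_iff]
            intro hc
            rcases (PySem.Set.mem_update _ _ _).1 hc with h | h
            · exact hm ((PySem.Set.contains_iff _ _).2 h)
            · rcases List.mem_map.1 h with ⟨q, hq, hqz⟩
              exact hm2 (List.mem_map.2 ⟨q, pvChain_fst_subset _ _ _ _ hq, hqz⟩)
          rw [pvF_cons_of_not_mem _ _ _ hu2, h2]

theorem pvOuterA_char (x : Int) (L : List (Int × Int)) (hN : (L.map (·.2)).Nodup) :
    ∀ (suffix : List (Int × Int)) (u : PySem.Set Int) (acc : List (List (Int × Int))),
      pvF u L = pvF u suffix →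
      (suffix.foldl (pvStepOuterA x L) (acc, u)).1 = acc ++ pvLoopB x (pvF u L) := by
  intro suffix
  induction suffix with
  | nil =>
      intro u acc hfd
      rw [hfd]
      show acc = acc ++ pvLoopB x (pvF u [])
      rw [show pvF u [] = ([] : List (Int × Int)) from rfl, pvLoopB]
      simp
  | cons p rest ih =>
      intro u acc hfd
      simp only [List.foldl_cons]
      by_cases hp : PySem.Set.contains u p.2 = true
      · have hstep : pvStepOuterA x L (acc, u) p = (acc, u) := by
          simp only [pvStepOuterA]
          rw [if_pos hp]
        rw [hstep]
        rw [pvF_cons_of_mem _ _ _ hp] at hfd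
        exact ih u acc hfd
      · -- p starts a new stack
        have hpu : p.2 ∉ u := fun h => hp ((PySem.Set.contains_iff _ _).2 h)
        have hL : pvF u L = p :: pvF u rest := by
          rw [hfd, pvF_cons_of_not_mem _ _ _ hp]
        have hsub : ((pvF u L).map (·.2)).Sublist (L.map (·.2)) :=
          List.Sublist.map _ (List.filter_sublist ..)
        have hndL : ((pvF u L).map (·.2)).Nodup := hN.sublist hsub
        have hnd : (p.2 :: ((pvF u rest).map (·.2))).Nodup := by
          rw [hL] at hndL
          simpa using hndL
        obtain ⟨hp2, hndT⟩ := List.nodup_cons.1 hnd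
        have hself : (pvF u rest).filter (fun q => !(q.2 == p.2)) = pvF u rest := by
          apply List.filter_eq_self.2
          intro q hq
          have : q.2 ≠ p.2 := fun e => hp2 (List.mem_map.2 ⟨q, hq, e⟩)
          simp [this]
        have hF1 : pvF (PySem.Set.add u p.2) L = pvF u rest := by
          rw [pvF_add, hL, List.filter_cons]
          simp [hself]
        have hndF1 : ((pvF (PySem.Set.add u p.2) L).map (·.2)).Nodup := by
          rw [hF1]; exact hndT
        obtain ⟨h1, h2⟩ := pvInnerA_char x L (PySem.Set.add u p.2) [p] p.1 hndF1
        rw [hF1] at h1 h2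
        have hstep : pvStepOuterA x L (acc, u) p =
            (acc ++ [[p] ++ (pvChain x p.1 (pvF u rest)).1],
             PySem.Set.update (PySem.Set.add u p.2)
               (((pvChain x p.1 (pvF u rest)).1).map (·.2))) := by
          simp only [pvStepOuterA]
          rw [if_neg hp]
          rw [h1]
        rw [hstep]
        set C := (pvChain x p.1 (pvF u rest)).1 with hC
        set R := (pvChain x p.1 (pvF u rest)).2.2 with hR
        set u2 := PySem.Set.update (PySem.Set.add u p.2) (C.map (·.2)) with hu2
        have hFL2 : pvF u2 L = R := h2
        have hFrest1 : pvF (PySem.Set.add u p.2) rest = pvF u rest := by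
          apply pvF_add_of_not_mem
          exact hp2
        have e1 : pvF u2 L = (pvF u rest).filter (fun q => !((C.map (·.2)).contains q.2)) := by
          rw [hu2, pvF_update, hF1]
        have e2 : pvF u2 rest = (pvF u rest).filter (fun q => !((C.map (·.2)).contains q.2)) := by
          rw [hu2, pvF_update, hFrest1]
        have hFR2 : pvF u2 rest = R := by rw [e2, ← e1, hFL2]
        have ihres := ih u2 (acc ++ [[p] ++ C]) (by rw [hFL2, hFR2])
        rw [ihres, hFL2]
        rw [hL]
        rw [show pvLoopB x (p :: pvF u rest) = ([p] ++ C) :: pvLoopB x R by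
          rw [pvLoopB]
          rw [pvPassB_char]
          simp [hC, hR]]
        simp

-- ===== VERDICT (by name: the statement is the Claim_ definition above) =====
theorem solve_brick_stacks_spec : Claim_equal_solve_brick_stacks := by
  intro N x bricks _
  unfold Spec_solve_brick_stacks
  simp only [solve_brick_stacks, solve_brick_stacks_alt]
  have hpairs : (((PySem.List.enumerate bricks).map (fun bi => (bi.2, bi.1 + 1))).map
      (fun q : Int × Int => q.2)).Nodup := by
    rw [List.map_map]
    have hpw := PySem.List.pairwise_lt_enumerate (xs := bricks) (s := 0)
    have : ((PySem.List.enumerate bricks).map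
        (fun bi : Int × Int => ((bi.2, bi.1 + 1) : Int × Int).2)).Pairwise (· < ·) :=
      hpw.map _ (fun a b hab => by simpa using (by omega : a.1 + 1 < b.1 + 1))
    exact this.imp (fun hab => ne_of_lt hab)
  have hN : ((PySem.List.sorted2 ((PySem.List.enumerate bricks).map
      (fun bi => (bi.2, bi.1 + 1))) (·.1) (·.2) true).map (fun q : Int × Int => q.2)).Nodup := by
    have hperm := PySem.List.sorted2_perm ((PySem.List.enumerate bricks).map
      (fun bi : Int × Int => (bi.2, bi.1 + 1))) (·.1) (·.2) true
    exact ((hperm.map (fun q : Int × Int => q.2)).nodup_iff).2 hpairs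
  have h0 : ∀ l : List (Int × Int), pvF PySem.Set.empty l = l := by
    intro l
    apply List.filter_eq_self.2
    intro q hq
    have : ¬ PySem.Set.contains PySem.Set.empty q.2 = true := by
      intro h
      simpa using (PySem.Set.contains_iff _ _).1 h
    simp [this]
  rw [pvOuterA_char x _ hN _ PySem.Set.empty [] rfl, h0]
  rw [pvFoldPlace_eq_loop x _ _ (le_refl _)]
  simp
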